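-- pv_equiv track=rewrite | github.com/NoirPrimordial7/wildlife_intrusion_detection_system | app/core/alert_service.py | _notification_summary
-- ===== SOURCE A (Python) =====
-- from typing import Any
--
-- def _notification_summary(results: list[dict[str, Any]]) -> str:
--     if not results:
--         return "no_registered_users"
--     statuses = {str(result.get("status", "")) for result in results}
--     if "sent" in statuses:
--         return "sent"
--     if "demo_sent" in statuses:
--         return "demo_sent"
--     if "failed" in statuses:
--         return "failed"
--     if "disabled" in statuses:
--         return "disabled"
--     return sorted(statuses)[0] if statuses else "unknown"
-- ===== SOURCE B (Python) =====
-- from typing import Any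
--
-- _RANK = {"sent": 0, "demo_sent": 1, "failed": 2, "disabled": 3}
--
-- def _notification_summary(results: list[dict[str, Any]]) -> str:
--     if not results:
--         return "no_registered_users"
--     statuses = [str(r.get("status", "")) for r in results]
--     return min(statuses, key=lambda s: (_RANK.get(s, 4), s))
-- ===== Notes on version B (the rewrite author's own statement) =====
-- stated objective: idiomatic
-- what changed: Replaced A's set-build plus four-way membership branch chain plus sorted()[0] fallback by a single argmin pass over the statuses with the composite key (priority rank, status).
import Mathlib
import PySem

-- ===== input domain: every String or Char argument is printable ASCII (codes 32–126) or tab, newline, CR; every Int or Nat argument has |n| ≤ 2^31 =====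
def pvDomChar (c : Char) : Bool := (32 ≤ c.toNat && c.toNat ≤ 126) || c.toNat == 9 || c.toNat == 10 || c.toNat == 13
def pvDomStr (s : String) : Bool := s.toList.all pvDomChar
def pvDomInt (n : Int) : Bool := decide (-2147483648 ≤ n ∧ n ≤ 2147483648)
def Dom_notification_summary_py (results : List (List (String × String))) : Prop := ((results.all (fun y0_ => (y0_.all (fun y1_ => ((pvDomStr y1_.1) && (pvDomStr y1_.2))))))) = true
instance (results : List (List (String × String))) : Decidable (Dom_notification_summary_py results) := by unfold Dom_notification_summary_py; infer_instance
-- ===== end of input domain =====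

-- B replaces A's set-build + membership branch chain + sorted()[0] by a single
-- argmin pass over the statuses with the composite key (priority rank, status).

-- ===== PORT A =====
def notification_summary_py (results : List (List (String × String))) : String :=
  if results = [] then "no_registered_users"
  else
    let statuses : PySem.Set String :=
      PySem.Set.ofList (results.map (fun r => PySem.Dict.getD ⟨r⟩ "status" ""))
    if PySem.Set.contains statuses "sent" then "sent"
    else if PySem.Set.contains statuses "demo_sent" then "demo_sent"
    else if PySem.Set.contains statuses "failed" then "failed"
    else if PySem.Set.contains statuses "disabled" then "disabled"
    else
      -- 'sorted(statuses)[0] if statuses else "unknown"': sorted is [] iff statuses is empty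
      match PySem.List.sorted statuses (fun x => x) false with
      | s :: _ => s
      | [] => "unknown"

-- ===== PORT B =====
-- _RANK = {"sent": 0, "demo_sent": 1, "failed": 2, "disabled": 3}
def pvRank : PySem.Dict String Int :=
  ⟨[("sent", 0), ("demo_sent", 1), ("failed", 2), ("disabled", 3)]⟩

def notification_summary_py_alt (results : List (List (String × String))) : String :=
  if results = [] then "no_registered_users"
  else
    let statuses := results.map (fun r => PySem.Dict.getD ⟨r⟩ "status" "")
    -- min(statuses, key=lambda s: (_RANK.get(s, 4), s)); statuses is nonempty here
    match PySem.List.min2? statuses (fun s => PySem.Dict.getD pvRank s 4) (fun s => s) with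
    | some m => m
    | none => ""

-- ===== PRECONDITION & SPEC =====
def Spec_notification_summary_py (results : List (List (String × String))) (out : String) : Prop := out = notification_summary_py_alt results
instance (results : List (List (String × String))) (out : String) : Decidable (Spec_notification_summary_py results out) := by unfold Spec_notification_summary_py; infer_instance

-- ===== CLAIM (what is proved, stated in full; the proofs are below) =====
def Claim_equal_notification_summary_py : Prop := ∀ (results : List (List (String × String))), Dom_notification_summary_py results → Spec_notification_summary_py results (notification_summary_py results)

-- ===== LEMMAS AND PROOFS =====

-- B's composite key, and the (non-strict) lexicographic order it induces.
def pvKey (s : String) : Int := PySem.Dict.getD pvRank s 4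

def pvLe (a b : String) : Prop := pvKey a < pvKey b ∨ (pvKey a = pvKey b ∧ a ≤ b)

lemma pvKey_other (s : String) (h1 : s ≠ "sent") (h2 : s ≠ "demo_sent")
    (h3 : s ≠ "failed") (h4 : s ≠ "disabled") : pvKey s = 4 := by
  have e1 : ("sent" == s) = false := beq_eq_false_iff_ne.mpr (Ne.symm h1)
  have e2 : ("demo_sent" == s) = false := beq_eq_false_iff_ne.mpr (Ne.symm h2)
  have e3 : ("failed" == s) = false := beq_eq_false_iff_ne.mpr (Ne.symm h3)
  have e4 : ("disabled" == s) = false := beq_eq_false_iff_ne.mpr (Ne.symm h4)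
  simp [pvKey, pvRank, PySem.Dict.getD, PySem.Dict.get?, List.find?, e1, e2, e3, e4]

lemma pvKey_cases (s : String) :
    s = "sent" ∨ s = "demo_sent" ∨ s = "failed" ∨ s = "disabled" ∨ pvKey s = 4 := by
  by_cases h1 : s = "sent"; · exact Or.inl h1
  by_cases h2 : s = "demo_sent"; · exact Or.inr (Or.inl h2)
  by_cases h3 : s = "failed"; · exact Or.inr (Or.inr (Or.inl h3))
  by_cases h4 : s = "disabled"; · exact Or.inr (Or.inr (Or.inr (Or.inl h4)))
  exact Or.inr (Or.inr (Or.inr (Or.inr (pvKey_other s h1 h2 h3 h4))))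

lemma pvLe_refl (a : String) : pvLe a a := Or.inr ⟨rfl, le_refl a⟩

lemma pvLe_trans {a b c : String} (h1 : pvLe a b) (h2 : pvLe b c) : pvLe a c := by
  rcases h1 with h1 | ⟨e1, l1⟩ <;> rcases h2 with h2 | ⟨e2, l2⟩
  · exact Or.inl (lt_trans h1 h2)
  · exact Or.inl (e2 ▸ h1)
  · exact Or.inl (e1 ▸ h2)
  · exact Or.inr ⟨e1.trans e2, le_trans l1 l2⟩

lemma pvLe_antisymm {a b : String} (h1 : pvLe a b) (h2 : pvLe b a) : a = b := by
  rcases h1 with h1 | ⟨e1, l1⟩ <;> rcases h2 with h2 | ⟨e2, l2⟩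
  · exact absurd h2 (lt_asymm h1)
  · exact absurd h1 (e2 ▸ lt_irrefl _)
  · exact absurd h2 (e1 ▸ lt_irrefl _)
  · exact le_antisymm l1 l2

lemma pvStep_true {m0 x : String}
    (h : (decide (pvKey x < pvKey m0) || (!decide (pvKey m0 < pvKey x) && decide (x < m0))) = true) :
    pvLe x m0 := by
  simp only [Bool.or_eq_true, Bool.and_eq_true, Bool.not_eq_true', decide_eq_true_eq,
    decide_eq_false_iff_not] at h
  rcases h with h | ⟨h1, h2⟩
  · exact Or.inl h
  · by_cases hk : pvKey x < pvKey m0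
    · exact Or.inl hk
    · exact Or.inr ⟨le_antisymm (not_lt.mp h1) (not_lt.mp hk), le_of_lt h2⟩

lemma pvStep_false {m0 x : String}
    (h : (decide (pvKey x < pvKey m0) || (!decide (pvKey m0 < pvKey x) && decide (x < m0))) = false) :
    pvLe m0 x := by
  rcases Bool.or_eq_false_iff.mp h with ⟨h1, h2⟩
  have hk : ¬ pvKey x < pvKey m0 := of_decide_eq_false h1
  rcases Bool.and_eq_false_iff.mp h2 with h3 | h3
  · have : decide (pvKey m0 < pvKey x) = true := by
      cases hd : decide (pvKey m0 < pvKey x) <;> simp [hd] at h3 ⊢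
    exact Or.inl (of_decide_eq_true this)
  · by_cases hk2 : pvKey m0 < pvKey x
    · exact Or.inl hk2
    · exact Or.inr ⟨le_antisymm (not_lt.mp hk) (not_lt.mp hk2),
        not_lt.mp (of_decide_eq_false h3)⟩

lemma pv_foldl_min (F : Option String → String → Option String)
    (hF : ∀ m x, F (some m) x
      = if (decide (pvKey x < pvKey m) || (!decide (pvKey m < pvKey x) && decide (x < m))) = true
        then some x else some m)
    (xs : List String) :
    ∀ m0 : String, ∃ m, List.foldl F (some m0) xs = some m
      ∧ m ∈ m0 :: xs ∧ ∀ t ∈ m0 :: xs, pvLe m t := by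
  induction xs with
  | nil =>
    intro m0
    refine ⟨m0, rfl, List.mem_cons_self, ?_⟩
    intro t ht
    rcases List.mem_cons.mp ht with rfl | ht
    · exact pvLe_refl t
    · cases ht
  | cons x rest ih =>
    intro m0
    have hstep : List.foldl F (some m0) (x :: rest) = List.foldl F (F (some m0) x) rest := rfl
    by_cases hc : (decide (pvKey x < pvKey m0) || (!decide (pvKey m0 < pvKey x) && decide (x < m0))) = true
    · have hacc : F (some m0) x = some x := by rw [hF, if_pos hc]
      obtain ⟨m, hm, hmem, hle⟩ := ih x
      refine ⟨m, by rw [hstep, hacc]; exact hm, ?_, ?_⟩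
      · rcases List.mem_cons.mp hmem with rfl | h
        · exact List.mem_cons_of_mem _ List.mem_cons_self
        · exact List.mem_cons_of_mem _ (List.mem_cons_of_mem _ h)
      · intro t ht
        rcases List.mem_cons.mp ht with rfl | ht
        · exact pvLe_trans (hle x List.mem_cons_self) (pvStep_true hc)
        · exact hle t ht
    · have hc' := Bool.not_eq_true _ |>.mp hc
      have hacc : F (some m0) x = some m0 := by rw [hF, if_neg hc]
      obtain ⟨m, hm, hmem, hle⟩ := ih m0
      refine ⟨m, by rw [hstep, hacc]; exact hm, ?_, ?_⟩
      · rcases List.mem_cons.mp hmem with rfl | h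
        · exact List.mem_cons_self
        · exact List.mem_cons_of_mem _ (List.mem_cons_of_mem _ h)
      · intro t ht
        rcases List.mem_cons.mp ht with rfl | ht
        · exact hle t List.mem_cons_self
        rcases List.mem_cons.mp ht with rfl | ht
        · exact pvLe_trans (hle m0 List.mem_cons_self) (pvStep_false hc')
        · exact hle t (List.mem_cons_of_mem _ ht)

lemma pv_min2_char (m0 : String) (xs : List String) :
    ∃ m, PySem.List.min2? (m0 :: xs) (fun s => PySem.Dict.getD pvRank s 4) (fun s => s) = some m
      ∧ m ∈ m0 :: xs ∧ ∀ t ∈ m0 :: xs, pvLe m t := by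
  simp only [PySem.List.min2?, List.foldl_cons]
  exact pv_foldl_min _ (fun m x => rfl) xs m0

-- a member that is pvLe-below every member is THE min2? result
lemma pv_min_unique {ss : List String} {v m : String}
    (hv : v ∈ ss) (hvle : ∀ t ∈ ss, pvLe v t)
    (hm : m ∈ ss) (hmle : ∀ t ∈ ss, pvLe m t) : v = m :=
  pvLe_antisymm (hvle m hm) (hmle v hv)

lemma pv_not_mem_of_contains_false {ss : List String} {a : String}
    (h : PySem.Set.contains (PySem.Set.ofList ss) a = false) : a ∉ ss := by
  intro hmem
  have : PySem.Set.contains (PySem.Set.ofList ss) a = true := by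
    unfold PySem.Set.contains
    exact List.contains_iff_mem.mpr ((PySem.Set.mem_ofList ss a).mpr hmem)
  rw [h] at this; cases this

lemma pv_mem_of_contains_true {ss : List String} {a : String}
    (h : PySem.Set.contains (PySem.Set.ofList ss) a = true) : a ∈ ss := by
  unfold PySem.Set.contains at h
  exact (PySem.Set.mem_ofList ss a).mp (List.contains_iff_mem.mp h)

-- ===== VERDICT (by name: the statement is the Claim_ definition above) =====
theorem notification_summary_py_spec : Claim_equal_notification_summary_py := by
  intro results _
  unfold Spec_notification_summary_py notification_summary_py notification_summary_py_alt
  cases results with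
  | nil => rfl
  | cons r rs =>
    simp only [reduceCtorEq, if_false, List.map_cons]
    set f : List (String × String) → String := fun r => PySem.Dict.getD ⟨r⟩ "status" "" with hf
    set ss : List String := f r :: rs.map f with hss
    obtain ⟨m, hm, hmmem, hmle⟩ := pv_min2_char (f r) (rs.map f)
    rw [hm]
    -- it remains to show: A's branch value equals m
    by_cases h1 : PySem.Set.contains (PySem.Set.ofList ss) "sent" = true
    · rw [if_pos h1]
      refine pv_min_unique (pv_mem_of_contains_true h1) ?_ hmmem hmle
      intro t ht
      rcases pvKey_cases t with rfl | rfl | rfl | rfl | hk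
      · exact pvLe_refl _
      · exact Or.inl (by decide)
      · exact Or.inl (by decide)
      · exact Or.inl (by decide)
      · exact Or.inl (by rw [hk]; decide)
    · have h1' := pv_not_mem_of_contains_false (Bool.not_eq_true _ |>.mp h1)
      rw [if_neg h1]
      by_cases h2 : PySem.Set.contains (PySem.Set.ofList ss) "demo_sent" = true
      · rw [if_pos h2]
        refine pv_min_unique (pv_mem_of_contains_true h2) ?_ hmmem hmle
        intro t ht
        rcases pvKey_cases t with rfl | rfl | rfl | rfl | hk
        · exact absurd ht h1'
        · exact pvLe_refl _
        · exact Or.inl (by decide)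
        · exact Or.inl (by decide)
        · exact Or.inl (by rw [hk]; decide)
      · have h2' := pv_not_mem_of_contains_false (Bool.not_eq_true _ |>.mp h2)
        rw [if_neg h2]
        by_cases h3 : PySem.Set.contains (PySem.Set.ofList ss) "failed" = true
        · rw [if_pos h3]
          refine pv_min_unique (pv_mem_of_contains_true h3) ?_ hmmem hmle
          intro t ht
          rcases pvKey_cases t with rfl | rfl | rfl | rfl | hk
          · exact absurd ht h1'
          · exact absurd ht h2'
          · exact pvLe_refl _
          · exact Or.inl (by decide)
          · exact Or.inl (by rw [hk]; decide)
        · have h3' := pv_not_mem_of_contains_false (Bool.not_eq_true _ |>.mp h3)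
          rw [if_neg h3]
          by_cases h4 : PySem.Set.contains (PySem.Set.ofList ss) "disabled" = true
          · rw [if_pos h4]
            refine pv_min_unique (pv_mem_of_contains_true h4) ?_ hmmem hmle
            intro t ht
            rcases pvKey_cases t with rfl | rfl | rfl | rfl | hk
            · exact absurd ht h1'
            · exact absurd ht h2'
            · exact absurd ht h3'
            · exact pvLe_refl _
            · exact Or.inl (by rw [hk]; decide)
          · have h4' := pv_not_mem_of_contains_false (Bool.not_eq_true _ |>.mp h4)
            rw [if_neg h4]
            cases hsort : PySem.List.sorted (PySem.Set.ofList ss) (fun x => x) false with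
            | nil =>
              have : PySem.Set.ofList ss = [] :=
                (PySem.List.sorted_eq_nil_iff _ _ _).mp hsort
              have hmem : f r ∈ PySem.Set.ofList ss :=
                (PySem.Set.mem_ofList ss (f r)).mpr List.mem_cons_self
              rw [this] at hmem; cases hmem
            | cons v tl =>
              have hv : v ∈ ss := by
                have : v ∈ PySem.List.sorted (PySem.Set.ofList ss) (fun x => x) false := by
                  rw [hsort]; exact List.mem_cons_self
                exact (PySem.Set.mem_ofList ss v).mp
                  ((PySem.List.mem_sorted _ _ _ _).mp this)
              refine pv_min_unique hv ?_ hmmem hmle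
              intro t ht
              have hkeyt : pvKey t = 4 := by
                rcases pvKey_cases t with rfl | rfl | rfl | rfl | hk
                · exact absurd ht h1'
                · exact absurd ht h2'
                · exact absurd ht h3'
                · exact absurd ht h4'
                · exact hk
              have hkeyv : pvKey v = 4 := by
                rcases pvKey_cases v with rfl | rfl | rfl | rfl | hk
                · exact absurd hv h1'
                · exact absurd hv h2'
                · exact absurd hv h3'
                · exact absurd hv h4'
                · exact hk
              refine Or.inr ⟨by rw [hkeyv, hkeyt], ?_⟩
              exact PySem.List.key_head_sorted_le _ _ hsort t
                ((PySem.Set.mem_ofList ss t).mpr ht)
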